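-- pv_equiv track=rewrite | github.com/okyanusatlas/coderbyte-python | 11_ab_check.py | ABCheck
-- ===== SOURCE A (Python) =====
-- def ABCheck(str):
--
--     array = list(str)
--     for counter, letter in enumerate(array):
--         if counter+4 < len(array):
--             if letter == "a" and array[counter+4] == "b":
--                 return True
--         else:
--             return False
--
--     return array
-- ===== SOURCE B (Python) =====
-- def ABCheck(str):
--     a_pos = {i for i, c in enumerate(str) if c == 'a'}
--     b_pos = {i - 4 for i, c in enumerate(str) if c == 'b'}
--     return not a_pos.isdisjoint(b_pos)
-- ===== Notes on version B (the rewrite author's own statement) =====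
-- stated objective: alternative
-- what changed: Replaces A's single index scan with early returns by two staged set-comprehension passes (positions of 'a', positions of 'b' shifted left by 4) followed by a set-disjointness test; Pre_ excludes the empty string, on which A falls through the loop and returns the non-bool [].
-- outside the precondition, e.g. on ABCheck(''): A returns [], B returns False
import Mathlib
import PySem

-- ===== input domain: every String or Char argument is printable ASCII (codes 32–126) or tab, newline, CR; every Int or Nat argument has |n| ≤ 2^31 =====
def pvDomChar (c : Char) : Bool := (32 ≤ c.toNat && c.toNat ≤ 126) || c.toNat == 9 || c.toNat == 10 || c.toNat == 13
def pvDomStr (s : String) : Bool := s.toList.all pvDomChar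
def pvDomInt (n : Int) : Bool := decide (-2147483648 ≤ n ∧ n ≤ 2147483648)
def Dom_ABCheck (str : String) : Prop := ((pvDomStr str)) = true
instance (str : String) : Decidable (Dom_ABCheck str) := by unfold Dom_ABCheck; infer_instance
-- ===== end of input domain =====

-- B replaces A's single index scan (early returns) by two staged set-comprehension passes
-- ('a' positions, 'b' positions shifted by 4) and a set-disjointness test; same O(n) cost.
-- Pre_ excludes only the empty string, on which A returns the non-bool [].

-- ===== PORT A =====
-- the 'for counter, letter in enumerate(array)' loop; the [] fallthrough (reachable only for
-- the empty string, which Pre_ excludes) is represented by false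
def ABCheckGo (arr : List Char) (counter : Nat) : List Char → Bool
  | [] => false
  | letter :: rest =>
      if counter + 4 < arr.length then
        if letter == 'a' && arr.getD (counter + 4) ' ' == 'b' then true
        else ABCheckGo arr (counter + 1) rest
      else false

def ABCheck (str : String) : Bool :=
  let array := str.toList
  ABCheckGo array 0 array

-- ===== PORT B =====
def ABCheck_alt (str : String) : Bool :=
  let aPos : PySem.Set Int := PySem.Set.ofList
    ((PySem.List.enumerate str.toList).filterMap
      (fun p => if p.2 == 'a' then some p.1 else none))
  let bPos : PySem.Set Int := PySem.Set.ofList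
    ((PySem.List.enumerate str.toList).filterMap
      (fun p => if p.2 == 'b' then some (p.1 - 4) else none))
  !(PySem.Set.isdisjoint aPos bPos)

-- ===== PRECONDITION & SPEC =====
-- Pre_ excludes only the empty string, on which A falls through the loop and returns the
-- list [] rather than a bool of the declared return type.
def Pre_ABCheck (str : String) : Prop := str ≠ ""
instance (str : String) : Decidable (Pre_ABCheck str) := by unfold Pre_ABCheck; infer_instance
def pvWitness_ABCheck : String := ("ax^zb")

def Spec_ABCheck (str : String) (out : Bool) : Prop := out = ABCheck_alt str
instance (str : String) (out : Bool) : Decidable (Spec_ABCheck str out) := by unfold Spec_ABCheck; infer_instance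

-- ===== CLAIM (what is proved, stated in full; the proofs are below) =====
def Claim_equal_ABCheck : Prop := ∀ (str : String), Dom_ABCheck str → Pre_ABCheck str → Spec_ABCheck str (ABCheck str)

-- ===== LEMMAS AND PROOFS =====

-- the condition both programs decide
def ABProp (l : List Char) : Prop :=
  ∃ j : Nat, j + 4 < l.length ∧ l.getD j ' ' = 'a' ∧ l.getD (j + 4) ' ' = 'b'

theorem abGo_iff (arr : List Char) : ∀ (s : List Char) (k : Nat),
    arr.drop k = s →
    (ABCheckGo arr k s = true ↔
      ∃ j : Nat, k ≤ j ∧ j + 4 < arr.length ∧ arr.getD j ' ' = 'a' ∧ arr.getD (j + 4) ' ' = 'b') := by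
  intro s
  induction s with
  | nil =>
    intro k hk
    have h1 : arr.length ≤ k := by
      by_contra h
      have := congrArg List.length hk
      simp [List.length_drop] at this
      omega
    refine iff_of_false (by simp [ABCheckGo]) ?_
    rintro ⟨j, hkj, hlen, -⟩
    omega
  | cons c cs ih =>
    intro k hk
    have hlenk : arr.length - k = cs.length + 1 := by
      have := congrArg List.length hk; simpa using this
    have hcs : arr.drop (k + 1) = cs := by
      have hdd : arr.drop (k + 1) = (arr.drop k).drop 1 := by rw [List.drop_drop]
      rw [hdd, hk]; rfl
    have hc : arr.getD k ' ' = c := by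
      have ha : arr[k]? = (arr.drop k)[0]? := by simp [List.getElem?_drop]
      simp [List.getD, ha, hk]
    by_cases h : k + 4 < arr.length
    · simp only [ABCheckGo, if_pos h]
      by_cases hq : (c == 'a' && arr.getD (k + 4) ' ' == 'b') = true
      · rw [if_pos hq]
        rw [Bool.and_eq_true, beq_iff_eq, beq_iff_eq] at hq
        exact iff_of_true rfl ⟨k, le_refl k, h, hc.trans hq.1, hq.2⟩
      · rw [if_neg hq, ih (k + 1) hcs]
        rw [Bool.and_eq_true, beq_iff_eq, beq_iff_eq] at hq
        constructor
        · rintro ⟨j, hj, hl, ha, hb'⟩; exact ⟨j, by omega, hl, ha, hb'⟩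
        · rintro ⟨j, hj, hl, ha, hb'⟩
          refine ⟨j, ?_, hl, ha, hb'⟩
          rcases Nat.eq_or_lt_of_le hj with rfl | hlt
          · exact absurd ⟨hc.symm.trans ha, hb'⟩ hq
          · omega
    · refine iff_of_false (by simp [ABCheckGo, if_neg h]) ?_
      rintro ⟨j, hkj, hl, -⟩
      omega

theorem abA_iff (l : List Char) : (ABCheckGo l 0 l = true) ↔ ABProp l := by
  rw [abGo_iff l l 0 (by simp)]
  unfold ABProp
  exact ⟨fun ⟨j, _, h⟩ => ⟨j, h⟩, fun ⟨j, h⟩ => ⟨j, Nat.zero_le j, h⟩⟩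

theorem abB_iff (str : String) : (ABCheck_alt str = true) ↔ ABProp str.toList := by
  unfold ABCheck_alt
  set l := str.toList with hl
  rw [Bool.not_eq_true', Bool.eq_false_iff]
  constructor
  · intro hdis
    rw [Ne, PySem.Set.isdisjoint_iff] at hdis
    push Not at hdis
    obtain ⟨x, hxa, hxb⟩ := hdis
    rw [PySem.Set.mem_ofList, List.mem_filterMap] at hxa hxb
    obtain ⟨pa, hpa, hpa2⟩ := hxa
    obtain ⟨pb, hpb, hpb2⟩ := hxb
    rw [PySem.List.mem_enumerate_iff] at hpa hpb
    obtain ⟨ja, hja, rfl⟩ := hpa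
    obtain ⟨jb, hjb, rfl⟩ := hpb
    simp only at hpa2 hpb2
    split_ifs at hpa2 with h1
    · split_ifs at hpb2 with h2
      · rw [beq_iff_eq] at h1 h2
        have hx1 : (0 : Int) + ja = x := Option.some.inj hpa2
        have hx2 : (0 : Int) + jb - 4 = x := Option.some.inj hpb2
        have hjab : jb = ja + 4 := by omega
        refine ⟨ja, by omega, ?_, ?_⟩
        · rw [List.getD_eq_getElem l ' ' hja]; exact h1
        · rw [List.getD_eq_getElem l ' ' (by omega : ja + 4 < l.length)]
          have : l[ja + 4] = l[jb] := by congr 1; omega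
          rw [this]; exact h2
  · rintro ⟨j, hjl, ha, hb⟩
    have ha' : l[j]'(by omega) = 'a' := by
      rw [← List.getD_eq_getElem l ' ' (by omega : j < l.length)]; exact ha
    have hb' : l[j + 4]'(by omega) = 'b' := by
      rw [← List.getD_eq_getElem l ' ' (by omega : j + 4 < l.length)]; exact hb
    rw [Ne, PySem.Set.isdisjoint_iff]
    push Not
    refine ⟨(j : Int), ?_, ?_⟩
    · rw [PySem.Set.mem_ofList, List.mem_filterMap]
      refine ⟨((0 : Int) + j, l[j]'(by omega)), ?_, ?_⟩
      · rw [PySem.List.mem_enumerate_iff]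
        exact ⟨j, by omega, rfl⟩
      · simp [ha']
    · rw [PySem.Set.mem_ofList, List.mem_filterMap]
      refine ⟨((0 : Int) + (j + 4 : Nat), l[j + 4]'(by omega)), ?_, ?_⟩
      · rw [PySem.List.mem_enumerate_iff]
        exact ⟨j + 4, by omega, rfl⟩
      · simp only [hb', beq_self_eq_true, if_pos]
        congr 1
        push_cast
        ring

-- ===== VERDICT (by name: the statement is the Claim_ definition above) =====
theorem ABCheck_spec : Claim_equal_ABCheck := by
  intro str _ _
  unfold Spec_ABCheck ABCheck
  show ABCheckGo str.toList 0 str.toList = ABCheck_alt str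
  have h1 := abA_iff str.toList
  have h2 := abB_iff str
  cases hA : ABCheckGo str.toList 0 str.toList <;> cases hB : ABCheck_alt str
  · rfl
  · exact absurd (h1.mpr (h2.mp hB)) (by simp [hA])
  · exact absurd (h2.mpr (h1.mp hA)) (by simp [hB])
  · rfl
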